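-- pv_equiv track=rewrite | github.com/ldct/cp | dmoj/appleby20/C/C.py | ans_slow
-- ===== SOURCE A (Python) =====
-- def ans_slow(s, T):
--     ss = set(s)
--     for t in T:
--         if t not in ss: return -1
--
--     i = 0
--     for t in T:
--         while s[i % len(s)] != t: i+= 1
--         i += 1
--
--     return i
-- ===== SOURCE B (Python) =====
-- def ans_slow(s, T):
--     n = len(s)
--     if n == 0:
--         return 0 if not T else -1
--     # nxt[p]: for each char c occurring in s[p:], the least index q >= p with s[q] == c
--     nxt = [None] * n
--     d = {}
--     for p in range(n - 1, -1, -1):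
--         d = dict(d)
--         d[s[p]] = p
--         nxt[p] = d
--     first = nxt[0]
--     i = 0
--     for t in T:
--         f = first.get(t)
--         if f is None:
--             return -1
--         p = i % n
--         q = nxt[p].get(t)
--         if q is None:
--             i += (n - p) + f + 1
--         else:
--             i += (q - p) + 1
--     return i
-- ===== Notes on version B (the rewrite author's own statement) =====
-- stated objective: alternative
-- what changed: Replaces the character-by-character cyclic scan by a precomputed per-position next-occurrence dictionary: each target character is handled by one lookup and a direct index jump instead of a while-loop walk; the trade is an O(|s|*alphabet) table build.
import Mathlib
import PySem

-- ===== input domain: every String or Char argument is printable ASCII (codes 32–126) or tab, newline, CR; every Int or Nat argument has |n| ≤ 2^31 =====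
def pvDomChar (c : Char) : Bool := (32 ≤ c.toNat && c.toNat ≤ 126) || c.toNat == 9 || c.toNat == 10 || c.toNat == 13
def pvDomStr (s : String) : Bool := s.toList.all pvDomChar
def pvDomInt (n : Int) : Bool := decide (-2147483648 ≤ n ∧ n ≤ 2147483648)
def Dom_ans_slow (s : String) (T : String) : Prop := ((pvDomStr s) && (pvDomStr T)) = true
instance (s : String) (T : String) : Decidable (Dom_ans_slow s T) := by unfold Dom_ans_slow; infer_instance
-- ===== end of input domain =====

-- B replaces A's character-by-character cyclic scan by a precomputed next-occurrence
-- table: one lookup and one index jump per target character (objective: alternative).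

-- ===== PORT A =====
-- the 'while s[i % len(s)] != t: i += 1' loop; the fuel argument (always sl.length at the
-- call site) only makes the recursion total — it is never exhausted on the used path,
-- because the loop is entered only after every char of T was checked to occur in s
def pvFind (sl : List Char) (t : Char) : Nat → Nat → Nat
  | i, 0 => i
  | i, fuel+1 => if sl.getD (i % sl.length) ' ' = t then i else pvFind sl t (i+1) fuel

def ans_slow (s : String) (T : String) : Int :=
  let sl := s.toList
  let ss : PySem.Set Char := PySem.Set.ofList sl
  if T.toList.all (fun t => ss.contains t) then
    ((T.toList.foldl (fun i t => pvFind sl t i sl.length + 1) 0 : Nat) : Int)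
  else -1

-- ===== PORT B =====
-- the backwards loop 'for p in range(n-1,-1,-1): d = dict(d); d[s[p]] = p; nxt[p] = d':
-- returns (d after the whole loop, the list nxt); p is the index of the list head
def pvBuild (sl : List Char) (p : Nat) : PySem.Dict Char Nat × List (PySem.Dict Char Nat) :=
  match sl with
  | [] => (PySem.Dict.empty, [])
  | c :: rest =>
      let r := pvBuild rest (p+1)
      let d' := r.1.insert c p
      (d', d' :: r.2)

-- the 'for t in T' loop of B, with its early 'return -1'
def pvLoop (n : Nat) (nxt : List (PySem.Dict Char Nat)) (first : PySem.Dict Char Nat) :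
    List Char → Nat → Int
  | [], i => (i : Int)
  | t :: ts, i =>
    match first.get? t with
    | none => -1
    | some f =>
      let p := i % n
      match (nxt.getD p PySem.Dict.empty).get? t with
      | none => pvLoop n nxt first ts (i + (n - p) + f + 1)
      | some q => pvLoop n nxt first ts (i + (q - p) + 1)

def ans_slow_alt (s : String) (T : String) : Int :=
  let sl := s.toList
  let n := sl.length
  if n = 0 then (if T.toList.isEmpty then 0 else -1)
  else
    let b := pvBuild sl 0
    pvLoop n b.2 b.1 T.toList 0

-- ===== PRECONDITION & SPEC =====
def Spec_ans_slow (s : String) (T : String) (out : Int) : Prop := out = ans_slow_alt s T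
instance (s : String) (T : String) (out : Int) : Decidable (Spec_ans_slow s T out) := by unfold Spec_ans_slow; infer_instance

-- ===== CLAIM (what is proved, stated in full; the proofs are below) =====
def Claim_equal_ans_slow : Prop := ∀ (s : String) (T : String), Dom_ans_slow s T → Spec_ans_slow s T (ans_slow s T)

-- ===== LEMMAS AND PROOFS =====

-- the dict (pvBuild sl p).1 maps each char of sl to p + its first index in sl
theorem pvBuild_fst_get? (sl : List Char) (p : Nat) (t : Char) :
    (pvBuild sl p).1.get? t = (sl.idxOf? t).map (p + ·) := by
  induction sl generalizing p with
  | nil => simp [pvBuild, PySem.Dict.get?_empty]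
  | cons c rest ih =>
    by_cases h : t = c
    · subst h
      simp [pvBuild, PySem.Dict.get?_insert_self, List.idxOf?_cons]
    · simp only [pvBuild, PySem.Dict.get?_insert_of_ne _ _ h, ih, List.idxOf?_cons]
      have hc : (c == t) = false := by simp; exact fun hh => h hh.symm
      simp [hc, Option.map_map]
      cases rest.idxOf? t <;> simp [Nat.add_comm, Nat.add_left_comm]

theorem pvBuild_snd_getD (sl : List Char) (p j : Nat) (hj : j < sl.length) :
    (pvBuild sl p).2.getD j PySem.Dict.empty = (pvBuild (sl.drop j) (p + j)).1 := by
  induction sl generalizing p j with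
  | nil => simp at hj
  | cons c rest ih =>
    cases j with
    | zero => simp [pvBuild]
    | succ j =>
      have hj' : j < rest.length := by simpa using hj
      simp only [pvBuild, List.getD_cons_succ, List.drop_succ_cons]
      rw [ih (p+1) j hj']
      ring_nf

-- characterisation of List.idxOf? as first matching index
theorem idxOf?_eq_some_char (xs : List Char) (t : Char) (k : Nat) (h : xs.idxOf? t = some k) :
    k < xs.length ∧ xs.getD k ' ' = t ∧ ∀ j, j < k → xs.getD j ' ' ≠ t := by
  induction xs generalizing k with
  | nil => simp [List.idxOf?] at h
  | cons c rest ih =>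
    rw [List.idxOf?_cons] at h
    by_cases hc : c = t
    · simp [hc] at h
      subst h
      simp [hc]
    · have hcb : (c == t) = false := by simp [hc]
      simp only [hcb] at h
      cases hr : rest.idxOf? t with
      | none => simp [hr] at h
      | some k' =>
        simp [hr] at h
        subst h
        obtain ⟨h1, h2, h3⟩ := ih k' hr
        refine ⟨by simpa using Nat.succ_lt_succ h1, by simpa using h2, ?_⟩
        intro j hj
        cases j with
        | zero => simpa using hc
        | succ j => simpa using h3 j (by omega)

theorem idxOf?_eq_none_char (xs : List Char) (t : Char) (h : xs.idxOf? t = none) : t ∉ xs := by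
  simpa [List.idxOf?_eq_none_iff] using h

-- A-side scan lemma: if the first match along the cyclic walk from i is after d steps,
-- the while-loop port returns i + d
theorem pvFind_eq (sl : List Char) (t : Char) :
    ∀ d i fuel, d < fuel →
      (∀ k, k < d → sl.getD ((i+k) % sl.length) ' ' ≠ t) →
      sl.getD ((i+d) % sl.length) ' ' = t →
      pvFind sl t i fuel = i + d := by
  intro d
  induction d with
  | zero =>
    intro i fuel hf _ hd
    cases fuel with
    | zero => omega
    | succ f =>
      simp only [Nat.add_zero] at hd
      simp only [pvFind, Nat.add_zero]
      rw [if_pos hd]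
  | succ d ih =>
    intro i fuel hf hk hd
    cases fuel with
    | zero => omega
    | succ f =>
      have h0 : sl.getD (i % sl.length) ' ' ≠ t := by
        have := hk 0 (by omega); simpa using this
      have hstep : pvFind sl t i (f+1) = pvFind sl t (i+1) f := by
        simp only [pvFind]
        rw [if_neg h0]
      rw [hstep, ih (i+1) f (by omega)
        (fun k hkk => by
          have := hk (k+1) (by omega)
          simpa [Nat.add_assoc, Nat.add_comm 1 k, Nat.add_left_comm] using this)
        (by
          have : i + 1 + d = i + (d + 1) := by omega
          rw [this]; exact hd)]
      omega

theorem mod_step (i j n : Nat) (h : i % n + j < n) : (i + j) % n = i % n + j := by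
  have h2 : i + j = (i % n + j) + (i / n) * n := by
    have h3 := Nat.div_add_mod i n
    have h4 : (i / n) * n = n * (i / n) := Nat.mul_comm _ _
    omega
  rw [h2, Nat.add_mul_mod_self_right, Nat.mod_eq_of_lt h]

theorem mod_wrap (i j n : Nat) (hn : 0 < n) (hj : j < n) :
    (i + (n - i % n) + j) % n = j := by
  have hp : i % n < n := Nat.mod_lt _ hn
  have h2 : i + (n - i % n) + j = j + (i / n + 1) * n := by
    have h3 := Nat.div_add_mod i n
    have h4 : (i / n + 1) * n = n * (i / n) + n := by ring
    omega
  rw [h2, Nat.add_mul_mod_self_right, Nat.mod_eq_of_lt hj]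

-- per-character step, match within the current pass: the A-side scan stops at index i%n + k
theorem pvFind_step_some (sl : List Char) (t : Char) (i k : Nat) (hne : sl ≠ [])
    (hdrop : (sl.drop (i % sl.length)).idxOf? t = some k) :
    pvFind sl t i sl.length = i + k := by
  set n := sl.length with hn
  have hn0 : 0 < n := List.length_pos_iff.mpr hne
  have hp : i % n < n := Nat.mod_lt _ hn0
  obtain ⟨hk1, hk2, hk3⟩ := idxOf?_eq_some_char _ _ _ hdrop
  rw [List.length_drop] at hk1
  apply pvFind_eq sl t k i n (by omega)
  · intro j hj
    have hlt : i % n + j < n := by omega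
    rw [mod_step i j n hlt]
    have := hk3 j hj
    rwa [List.getD_eq_getElem?_getD, List.getElem?_drop, ← List.getD_eq_getElem?_getD] at this
  · have hlt : i % n + k < n := by omega
    rw [mod_step i k n hlt]
    rwa [List.getD_eq_getElem?_getD, List.getElem?_drop, ← List.getD_eq_getElem?_getD] at hk2

-- per-character step, wrap-around: the scan runs to the end of s and on to the first occurrence
theorem pvFind_step_none (sl : List Char) (t : Char) (i f : Nat) (hne : sl ≠ [])
    (hdrop : (sl.drop (i % sl.length)).idxOf? t = none)
    (hfull : sl.idxOf? t = some f) :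
    pvFind sl t i sl.length = i + ((sl.length - i % sl.length) + f) := by
  set n := sl.length with hn
  have hn0 : 0 < n := List.length_pos_iff.mpr hne
  have hp : i % n < n := Nat.mod_lt _ hn0
  have hnot : t ∉ sl.drop (i % n) := idxOf?_eq_none_char _ _ hdrop
  obtain ⟨hf1, hf2, hf3⟩ := idxOf?_eq_some_char _ _ _ hfull
  have hsf : sl[f]? = some t := by
    rw [List.getD_eq_getElem?_getD, List.getElem?_eq_getElem hf1] at hf2
    rw [List.getElem?_eq_getElem hf1]
    simpa using hf2
  -- t occurs only before i % n, at first index f < i % n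
  have hflt : f < i % n := by
    by_contra hge
    apply hnot
    have he : (sl.drop (i % n))[f - i % n]? = sl[f]? := by
      rw [List.getElem?_drop]
      congr 1
      omega
    exact List.mem_of_getElem? (he.trans hsf)
  apply pvFind_eq sl t ((n - i % n) + f) i n (by omega)
  · intro j hj
    by_cases hjs : j < n - i % n
    · have hlt : i % n + j < n := by omega
      rw [mod_step i j n hlt]
      intro hbad
      apply hnot
      have hb2 : sl[i % n + j]? = some t := by
        rw [List.getD_eq_getElem?_getD,
          List.getElem?_eq_getElem (by omega : i % n + j < sl.length)] at hbad
        rw [List.getElem?_eq_getElem (by omega : i % n + j < sl.length)]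
        simpa using hbad
      have he : (sl.drop (i % n))[j]? = sl[i % n + j]? := by
        rw [List.getElem?_drop]
      exact List.mem_of_getElem? (he.trans hb2)
    · -- wrapped around: position j - (n - i % n) < f, before the first occurrence
      have hj' : j - (n - i % n) < f := by omega
      have heq : i + j = i + (n - i % n) + (j - (n - i % n)) := by omega
      rw [heq, mod_wrap i _ n hn0 (by omega)]
      exact hf3 _ hj'
  · have heq : i + ((n - i % n) + f) = i + (n - i % n) + f := by omega
    rw [heq, mod_wrap i f n hn0 (by omega)]
    exact hf2

-- B's loop returns -1 as soon as it meets a char absent from s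
theorem pvLoop_neg (sl : List Char) :
    ∀ ts i, (∃ t ∈ ts, t ∉ sl) →
      pvLoop sl.length (pvBuild sl 0).2 (pvBuild sl 0).1 ts i = -1 := by
  intro ts
  induction ts with
  | nil => intro i h; simp at h
  | cons t ts ih =>
    intro i h
    by_cases hm : t ∈ sl
    · have hidx : ∃ f, sl.idxOf? t = some f := by
        cases hfull : sl.idxOf? t with
        | none => exact absurd hm (idxOf?_eq_none_char _ _ hfull)
        | some f => exact ⟨f, rfl⟩
      obtain ⟨f, hf⟩ := hidx
      have hget : (pvBuild sl 0).1.get? t = some f := by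
        rw [pvBuild_fst_get?, hf]; simp
      have hw : ∃ x ∈ ts, x ∉ sl := by
        obtain ⟨x, hx1, hx2⟩ := h
        rcases List.mem_cons.mp hx1 with h' | h'
        · exact absurd hm (by simpa [h'] using hx2)
        · exact ⟨x, h', hx2⟩
      simp only [pvLoop, hget]
      cases hq : ((pvBuild sl 0).2.getD (i % sl.length) PySem.Dict.empty).get? t with
      | none => exact ih _ hw
      | some q => exact ih _ hw
    · have hget : (pvBuild sl 0).1.get? t = none := by
        rw [pvBuild_fst_get?]
        cases hfull : sl.idxOf? t with
        | none => simp
        | some f =>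
          obtain ⟨hf1, hf2, _⟩ := idxOf?_eq_some_char _ _ _ hfull
          exfalso; apply hm
          rw [List.getD_eq_getElem?_getD, List.getElem?_eq_getElem hf1] at hf2
          simp at hf2
          rw [← hf2]; exact List.getElem_mem _
      simp [pvLoop, hget]

-- B's loop equals folding A's scan step, whenever every remaining char occurs in s
theorem pvLoop_eq (sl : List Char) (hne : sl ≠ []) :
    ∀ ts i, (∀ t ∈ ts, t ∈ sl) →
      pvLoop sl.length (pvBuild sl 0).2 (pvBuild sl 0).1 ts i =
        ((ts.foldl (fun i t => pvFind sl t i sl.length + 1) i : Nat) : Int) := by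
  intro ts
  induction ts with
  | nil => intro i _; simp [pvLoop]
  | cons t ts ih =>
    intro i hmem
    have ht : t ∈ sl := hmem t (by simp)
    have hn0 : 0 < sl.length := List.length_pos_iff.mpr hne
    have hp : i % sl.length < sl.length := Nat.mod_lt _ hn0
    obtain ⟨f, hf⟩ : ∃ f, sl.idxOf? t = some f := by
      cases hfull : sl.idxOf? t with
      | none => exact absurd ht (idxOf?_eq_none_char _ _ hfull)
      | some f => exact ⟨f, rfl⟩
    have hget : (pvBuild sl 0).1.get? t = some f := by
      rw [pvBuild_fst_get?, hf]; simp
    have hnxt : ((pvBuild sl 0).2.getD (i % sl.length) PySem.Dict.empty).get? t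
        = ((sl.drop (i % sl.length)).idxOf? t).map ((i % sl.length) + ·) := by
      rw [pvBuild_snd_getD sl 0 (i % sl.length) hp, pvBuild_fst_get?]
      simp
    simp only [pvLoop, hget]
    cases hdrop : (sl.drop (i % sl.length)).idxOf? t with
    | none =>
      rw [hdrop] at hnxt
      simp only [hnxt, Option.map_none]
      rw [ih _ (fun x hx => hmem x (by simp [hx]))]
      congr 1
      simp only [List.foldl_cons]
      congr 1
      rw [pvFind_step_none sl t i f hne hdrop hf]
      omega
    | some k =>
      rw [hdrop] at hnxt
      simp only [hnxt, Option.map_some]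
      rw [ih _ (fun x hx => hmem x (by simp [hx]))]
      congr 1
      simp only [List.foldl_cons]
      congr 1
      rw [pvFind_step_some sl t i k hne hdrop]
      omega

-- ===== VERDICT (by name: the statement is the Claim_ definition above) =====
theorem ans_slow_spec : Claim_equal_ans_slow := by
  intro s T _
  unfold Spec_ans_slow ans_slow ans_slow_alt
  by_cases hsl : s.toList = []
  · simp only [hsl, List.length_nil]
    cases hT : T.toList with
    | nil => simp
    | cons t ts => simp
  · have hn0 : s.toList.length ≠ 0 := by simpa [List.length_eq_zero_iff] using hsl
    simp only [if_neg hn0]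
    by_cases hall : ∀ t ∈ T.toList, t ∈ s.toList
    · have hb : T.toList.all (fun t => (PySem.Set.ofList s.toList).contains t) = true := by
        simp only [List.all_eq_true]
        intro t htm
        rw [PySem.Set.contains_iff, PySem.Set.mem_ofList]
        exact hall t htm
      rw [if_pos hb, pvLoop_eq s.toList hsl T.toList 0 hall]
    · obtain ⟨t, ht1, ht2⟩ : ∃ t ∈ T.toList, t ∉ s.toList := by
        by_contra hc
        apply hall
        intro t htm
        by_contra hmm
        exact hc ⟨t, htm, hmm⟩
      have hb : T.toList.all (fun t => (PySem.Set.ofList s.toList).contains t) = false := by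
        simp only [List.all_eq_false]
        refine ⟨t, ht1, ?_⟩
        simp [PySem.Set.mem_ofList, ht2]
      rw [if_neg (by simp only [hb]; exact Bool.false_ne_true)]
      exact (pvLoop_neg s.toList T.toList 0 ⟨t, ht1, ht2⟩).symm
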